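-- pv_equiv track=rewrite | github.com/YeZibn/SynthAgent | synth_agent/rag/rag_manager.py | _get_overlap_content
-- ===== SOURCE A (Python) =====
-- def _get_overlap_content(text: str, overlap_size: int) -> str:
--     """获取文本末尾的overlap内容
--
--     优先在句子边界分割，避免截断句子。
--
--     Args:
--         text: 原始文本
--         overlap_size: overlap大小（字符数）
--
--     Returns:
--         overlap文本
--     """
--     if len(text) <= overlap_size:
--         return text
--
--     overlap_text = text[-overlap_size:]
--
--     sentence_endings = ['。', '！', '？', '.', '!', '?', '\n']
--
--     for i, char in enumerate(overlap_text):
--         if char in sentence_endings: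
--             return overlap_text[i+1:].strip()
--
--     return overlap_text
-- ===== SOURCE B (Python) =====
-- def _get_overlap_content(text: str, overlap_size: int) -> str:
--     """Delimiter-driven rewrite: find each sentence-ending's first position
--     with str.find and cut at the minimum hit, instead of scanning the
--     overlap character by character."""
--     if len(text) <= overlap_size:
--         return text
--
--     overlap_text = text[-overlap_size:]
--
--     positions = [overlap_text.find(c) for c in ['。', '！', '？', '.', '!', '?', '\n']]
--     hits = [p for p in positions if p != -1]
--     if hits:
--         return overlap_text[min(hits) + 1:].strip()
--     return overlap_text
-- ===== Notes on version B (the rewrite author's own statement) =====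
-- stated objective: faster
-- what changed: Replaces the per-character Python scan of the overlap (membership test of each char in the delimiter list) by one C-level str.find per delimiter, keeping the earliest non-(-1) hit via min and slicing there.
import Mathlib
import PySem

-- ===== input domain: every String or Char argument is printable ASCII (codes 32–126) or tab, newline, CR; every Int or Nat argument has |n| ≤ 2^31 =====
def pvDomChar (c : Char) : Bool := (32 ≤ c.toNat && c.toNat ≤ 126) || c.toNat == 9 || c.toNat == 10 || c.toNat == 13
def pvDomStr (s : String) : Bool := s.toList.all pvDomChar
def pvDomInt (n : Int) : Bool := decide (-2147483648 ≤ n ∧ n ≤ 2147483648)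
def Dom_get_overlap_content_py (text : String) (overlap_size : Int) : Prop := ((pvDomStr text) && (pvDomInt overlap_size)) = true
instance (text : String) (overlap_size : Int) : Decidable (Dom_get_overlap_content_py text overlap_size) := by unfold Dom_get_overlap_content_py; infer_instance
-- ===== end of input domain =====

-- B replaces A's per-character scan of the overlap by one str.find per delimiter, cutting at the minimum hit (objective: faster by moving the scan into str.find; measured).

-- ===== PORT A =====
def pyEndings : List Char := ['。', '！', '？', '.', '!', '?', '\n']

-- the 'for i, char in enumerate(overlap_text)' loop of A
def get_overlap_content_scan (s : List Char) (i : Nat) (overlap : String) : String :=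
  match s with
  | [] => overlap
  | c :: rest =>
    if c ∈ pyEndings then
      PySem.Str.strip (PySem.Str.slice overlap (some ((i : Int) + 1)) none)
    else get_overlap_content_scan rest (i + 1) overlap

def get_overlap_content_py (text : String) (overlap_size : Int) : String :=
  if PySem.Str.len text ≤ overlap_size then text
  else
    let overlap_text := PySem.Str.slice text (some (-overlap_size)) none
    get_overlap_content_scan overlap_text.toList 0 overlap_text

-- ===== PORT B =====
def pyEndingsStrs : List String := ["。", "！", "？", ".", "!", "?", "\n"]

def get_overlap_content_py_alt (text : String) (overlap_size : Int) : String :=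
  if PySem.Str.len text ≤ overlap_size then text
  else
    let overlap_text := PySem.Str.slice text (some (-overlap_size)) none
    let positions := pyEndingsStrs.map (fun c => PySem.Str.find overlap_text c)
    let hits := positions.filter (fun p => p != -1)
    match PySem.List.min? hits (fun p => p) with
    | some m => PySem.Str.strip (PySem.Str.slice overlap_text (some (m + 1)) none)
    | none => overlap_text

-- ===== PRECONDITION & SPEC =====
def Spec_get_overlap_content_py (text : String) (overlap_size : Int) (out : String) : Prop := out = get_overlap_content_py_alt text overlap_size
instance (text : String) (overlap_size : Int) (out : String) : Decidable (Spec_get_overlap_content_py text overlap_size out) := by unfold Spec_get_overlap_content_py; infer_instance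

-- ===== CLAIM (what is proved, stated in full; the proofs are below) =====
def Claim_equal_get_overlap_content_py : Prop := ∀ (text : String) (overlap_size : Int), Dom_get_overlap_content_py text overlap_size → Spec_get_overlap_content_py text overlap_size (get_overlap_content_py text overlap_size)

-- ===== LEMMAS AND PROOFS =====

-- Chars.find on a single-character needle is the first index of that character.
theorem find_single (s : List Char) (c : Char) :
    PySem.Chars.find s [c] = match s.findIdx? (· == c) with
      | some j => (j : Int)
      | none => -1 := by
  cases h : s.findIdx? (· == c) with
  | none =>
    rw [List.findIdx?_eq_none_iff] at h
    simp only []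
    rw [PySem.Chars.find_eq_neg_one_iff]
    intro hinf
    have hc : c ∈ s := by
      rcases hinf with ⟨l, r, hlr⟩
      subst hlr; simp
    have := h c hc
    simp at this
  | some j =>
    rw [List.findIdx?_eq_some_iff_getElem] at h
    obtain ⟨hj, hpc, hmin⟩ := h
    have hcj : s[j] = c := by simpa using hpc
    have hinf : [c] <:+: s := by
      refine ⟨s.take j, s.drop (j+1), ?_⟩
      rw [← hcj]
      simp
    have hnn : 0 ≤ PySem.Chars.find s [c] := (PySem.Chars.find_nonneg_iff s [c]).mpr hinf
    obtain ⟨hpre, hminf⟩ := PySem.Chars.find_spec hnn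
    set t := (PySem.Chars.find s [c]).toNat with ht
    have hgt : s[t]? = some c := by
      obtain ⟨r, hr⟩ := hpre
      rw [← List.head?_drop, ← hr]; rfl
    have htlen : t < s.length := by
      have := List.getElem?_eq_some_iff.mp hgt
      exact this.1
    have hstc : s[t] = c := by
      have := List.getElem?_eq_some_iff.mp hgt
      exact this.2
    have h1 : t ≤ j := by
      by_contra hlt
      push Not at hlt
      apply hminf j hlt
      refine ⟨s.drop (j+1), ?_⟩
      rw [← hcj]
      simp
    have h2 : j ≤ t := by
      by_contra hlt
      push Not at hlt
      have := hmin t hlt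
      simp [hstc] at this
    have htj : t = j := le_antisymm h1 h2
    show PySem.Chars.find s [c] = (j : Int)
    omega

-- A's scan, characterised by findIdx? over the delimiter-membership predicate.
theorem scanA (ov : String) (s : List Char) : ∀ i : Nat,
    get_overlap_content_scan s i ov =
      match s.findIdx? (fun c => decide (c ∈ pyEndings)) with
      | some j => PySem.Str.strip (PySem.Str.slice ov (some (((i + j : Nat) : Int) + 1)) none)
      | none => ov := by
  induction s with
  | nil => intro i; simp [get_overlap_content_scan]
  | cons c rest ih =>
    intro i
    rw [List.findIdx?_cons]
    by_cases hc : c ∈ pyEndings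
    · simp [get_overlap_content_scan, hc]
    · simp only [get_overlap_content_scan, hc, if_false, decide_eq_true_eq]
      rw [ih (i + 1)]
      cases h : rest.findIdx? (fun c => decide (c ∈ pyEndings)) with
      | none => simp
      | some j =>
        simp only [Option.map_some]
        have : ((i + 1 + j : Nat) : Int) = ((i + (j + 1) : Nat) : Int) := by omega
        rw [this]

-- B's positions list, rewritten to Chars.find with singleton needles.
theorem positions_eq (ov : String) :
    pyEndingsStrs.map (fun c => PySem.Str.find ov c)
      = pyEndings.map (fun ch => PySem.Chars.find ov.toList [ch]) := by
  simp [pyEndingsStrs, pyEndings]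

-- ===== VERDICT (by name: the statement is the Claim_ definition above) =====
theorem get_overlap_content_py_spec : Claim_equal_get_overlap_content_py := by
  intro text overlap_size _
  unfold Spec_get_overlap_content_py get_overlap_content_py get_overlap_content_py_alt
  by_cases hlen : PySem.Str.len text ≤ overlap_size
  · rw [if_pos hlen, if_pos hlen]
  · rw [if_neg hlen, if_neg hlen]
    set ov := PySem.Str.slice text (some (-overlap_size)) none with hov
    set s := ov.toList with hs
    rw [scanA ov s 0]
    simp only [positions_eq, ← hs]
    cases h : s.findIdx? (fun c => decide (c ∈ pyEndings)) with
    | none =>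
      rw [List.findIdx?_eq_none_iff] at h
      have hall : ∀ ch ∈ pyEndings, PySem.Chars.find s [ch] = -1 := by
        intro ch hch
        rw [find_single]
        have : s.findIdx? (· == ch) = none := by
          rw [List.findIdx?_eq_none_iff]
          intro x hx
          by_contra hb
          simp only [Bool.not_eq_false, beq_iff_eq] at hb
          subst hb
          have := h x hx
          simp [hch] at this
        simp [this]
      have hfil : (pyEndings.map (fun ch => PySem.Chars.find s [ch])).filter (fun p => p != -1) = [] := by
        rw [List.filter_eq_nil_iff]
        intro p hp
        rcases List.mem_map.mp hp with ⟨ch, hch, hpe⟩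
        simp [← hpe, hall ch hch]
      rw [hfil]
      have hmn : PySem.List.min? ([] : List Int) (fun p => p) = none :=
        (PySem.List.min?_eq_none_iff _ _).mpr rfl
      rw [hmn]
    | some j =>
      rw [List.findIdx?_eq_some_iff_getElem] at h
      obtain ⟨hj, hpc, hmin⟩ := h
      have hcE : s[j] ∈ pyEndings := by simpa using hpc
      -- the delimiter found at j has its first occurrence exactly at j
      have hfcj : PySem.Chars.find s [s[j]] = (j : Int) := by
        rw [find_single]
        have : s.findIdx? (· == s[j]) = some j := by
          rw [List.findIdx?_eq_some_iff_getElem]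
          refine ⟨hj, by simp, ?_⟩
          intro i hij
          by_contra hb
          simp only [beq_iff_eq] at hb
          have := hmin i hij
          rw [hb] at this
          simp [hcE] at this
        simp [this]
      have hjmem : (j : Int) ∈ (pyEndings.map (fun ch => PySem.Chars.find s [ch])).filter (fun p => p != -1) := by
        rw [List.mem_filter]
        constructor
        · exact List.mem_map.mpr ⟨s[j], hcE, hfcj⟩
        · simp
      set hits := (pyEndings.map (fun ch => PySem.Chars.find s [ch])).filter (fun p => p != -1) with hhits
      cases hm : PySem.List.min? hits (fun p => p) with
      | none =>
        rw [PySem.List.min?_eq_none_iff] at hm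
        rw [hm] at hjmem
        simp at hjmem
      | some m =>
        -- m ≤ j since j is a hit
        have hle : m ≤ (j : Int) := PySem.List.min?_isMin hm _ hjmem
        -- j ≤ m : every hit is the first index of some delimiter present in s
        have hmem := PySem.List.min?_mem hm
        rw [hhits, List.mem_filter] at hmem
        obtain ⟨hmmap, hmne⟩ := hmem
        rcases List.mem_map.mp hmmap with ⟨ch, hch, hfch⟩
        have hge : (j : Int) ≤ m := by
          rw [find_single] at hfch
          cases hidx : s.findIdx? (· == ch) with
          | none => rw [hidx] at hfch; simp at hfch; simp [← hfch] at hmne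
          | some jm =>
            rw [hidx] at hfch
            simp only [] at hfch
            rw [List.findIdx?_eq_some_iff_getElem] at hidx
            obtain ⟨hjm, hpjm, _⟩ := hidx
            have hsjm : s[jm] = ch := by simpa using hpjm
            have : j ≤ jm := by
              by_contra hb
              push Not at hb
              have := hmin jm hb
              rw [hsjm] at this
              simp [hch] at this
            omega
        have hmj : m = (j : Int) := le_antisymm hle hge
        subst hmj
        simp
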